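-- pv_equiv track=rewrite | github.com/abcworld123/practice | programmers/Lv 2/빛의 경로 사이클.py | solution
-- ===== SOURCE A (Python) =====
-- dirs = [(1, 0), (0, 1), (-1, 0), (0, -1)]
--
-- def go(c, d):
--     if c == 'S': return d
--     elif c == 'L': return dirs[(dirs.index(d) - 1) % 4]
--     elif c == 'R': return dirs[(dirs.index(d) + 1) % 4]
--
-- def solution(grid):
--     arrows = set()
--     answer = []
--     len_y, len_x = len(grid), len(grid[0])
--     for y in range(len_y):
--         for x in range(len_x):
--             for dy, dx in dirs:
--                 answer.append(0)
--                 cur_y, cur_x = y, x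
--                 while True:
--                     dy, dx = go(grid[cur_y][cur_x], (dy, dx))
--                     arrow = f'{cur_y},{cur_x},{dy},{dx}'
--                     if arrow not in arrows:
--                         arrows.add(arrow)
--                         answer[-1] += 1
--                         cur_y, cur_x = (cur_y + dy) % len_y, (cur_x + dx) % len_x
--                     else: break
--
--     return sorted([x for x in answer if x])
-- ===== SOURCE B (Python) =====
-- DIRS = [(1, 0), (0, 1), (-1, 0), (0, -1)]
--
-- # rotation of the direction index caused by each kind of cell
-- TURN = {'S': 0, 'L': 3, 'R': 1}
--
--
-- def solution(grid):
--     h, w = len(grid), len(grid[0])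
--
--     def step(s):
--         y, x, d = s
--         dy, dx = DIRS[d]
--         y, x = (y + dy) % h, (x + dx) % w
--         return (y, x, (d + TURN[grid[y][x]]) % 4)
--
--     # The step map is a permutation of the 4*h*w states (it has an explicit
--     # inverse), so its orbits are disjoint cycles.  Count each cycle once, at
--     # its lexicographically smallest state, with no visited structure at all:
--     # walk forward while the current state is larger than the start; if we get
--     # back to the start it was the minimum of its cycle and n is the length.
--     lengths = []
--     for y in range(h):
--         for x in range(w):
--             for d in range(4):
--                 s = (y, x, d)
--                 n, t = 1, step(s)
--                 while s < t:
--                     n += 1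
--                     t = step(t)
--                 if t == s:
--                     lengths.append(n)
--     return sorted(lengths)
-- ===== Notes on version B (the rewrite author's own statement) =====
-- stated objective: alternative
-- what changed: B keeps no visited structure at all: using that the light step is a permutation of the 4*h*w states, it walks each state's cycle and records its length exactly once, at the cycle's lexicographically smallest state, instead of A's global visited set with append-0-per-start bookkeeping and a final truthiness filter.
import Mathlib
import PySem

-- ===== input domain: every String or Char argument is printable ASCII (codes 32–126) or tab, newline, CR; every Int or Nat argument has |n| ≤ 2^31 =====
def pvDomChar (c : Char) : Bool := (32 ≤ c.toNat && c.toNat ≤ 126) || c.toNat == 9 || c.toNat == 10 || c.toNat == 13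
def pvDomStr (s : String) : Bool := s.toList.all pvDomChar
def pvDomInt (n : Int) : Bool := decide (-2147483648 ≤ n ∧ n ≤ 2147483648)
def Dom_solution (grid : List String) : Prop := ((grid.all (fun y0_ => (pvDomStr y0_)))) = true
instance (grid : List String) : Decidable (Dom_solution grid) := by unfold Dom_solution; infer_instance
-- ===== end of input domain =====

-- B keeps no visited structure at all: the light step is a permutation of the 4·h·w
-- (cell, direction) states, so B walks each state's cycle and records its length exactly
-- once, at the cycle's lexicographically smallest state; objective: alternative algorithm.

-- ===== PORT A =====
def pvDirs : List (Int × Int) := [(1, 0), (0, 1), (-1, 0), (0, -1)]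

-- go(c, d); Python returns None for any other character (the caller then crashes
-- unpacking it) — those grids are excluded by Pre_solution, the final else is junk.
def pvGo (c : Char) (d : Int × Int) : Int × Int :=
  if c = 'S' then d
  else if c = 'L' then
    PySem.List.pyGetD pvDirs
      (PySem.Int.mod ((((PySem.List.index? pvDirs d).getD 0 : Nat) : Int) - 1) 4) (0, 0)
  else if c = 'R' then
    PySem.List.pyGetD pvDirs
      (PySem.Int.mod ((((PySem.List.index? pvDirs d).getD 0 : Nat) : Int) + 1) 4) (0, 0)
  else d

-- grid[y][x] (total form; indices are in range wherever the ports use it under Pre_)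
def pvChar (grid : List String) (y x : Int) : Char :=
  (PySem.Str.pyGet? (PySem.List.pyGetD grid y "") x).getD ' '

-- f'{cur_y},{cur_x},{dy},{dx}'
def pvArrow (cur_y cur_x dy dx : Int) : List Char :=
  PySem.Int.toChars cur_y ++ ',' :: (PySem.Int.toChars cur_x ++ ',' ::
    (PySem.Int.toChars dy ++ ',' :: PySem.Int.toChars dx))

-- the 'while True' loop; Python's 'answer.append(0) … answer[-1] += 1' is carried as the
-- counter cnt, appended by pvSeedA when the loop breaks.  fuel ((4·len_y·len_x)+1 states)
-- strictly exceeds the number of iterations the Python loop can make (each non-breaking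
-- iteration adds a fresh arrow, and there are only 4·len_y·len_x possible arrows).
def pvLoopA (grid : List String) (len_y len_x : Int) :
    Nat → PySem.Set (List Char) → Int → Int → Int → Int × Int →
      PySem.Set (List Char) × Int
  | 0, arrows, cnt, _, _, _ => (arrows, cnt)
  | fuel + 1, arrows, cnt, cur_y, cur_x, d =>
    let d2 := pvGo (pvChar grid cur_y cur_x) d
    let arrow := pvArrow cur_y cur_x d2.1 d2.2
    if PySem.Set.contains arrows arrow then (arrows, cnt)
    else pvLoopA grid len_y len_x fuel (PySem.Set.add arrows arrow) (cnt + 1)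
      (PySem.Int.mod (cur_y + d2.1) len_y) (PySem.Int.mod (cur_x + d2.2) len_x) d2

-- body of A's innermost 'for dy, dx in dirs' loop
def pvSeedA (grid : List String) (len_y len_x : Int) (fuel : Nat) (y x : Int)
    (st : PySem.Set (List Char) × List Int) (dd : Int × Int) :
    PySem.Set (List Char) × List Int :=
  let r := pvLoopA grid len_y len_x fuel st.1 0 y x dd
  (r.1, st.2 ++ [r.2])

def solution (grid : List String) : List Int :=
  let len_y : Int := PySem.List.len grid
  let len_x : Int := PySem.Str.len (PySem.List.pyGetD grid 0 "")
  let fuel : Nat := (4 * len_y * len_x + 1).toNat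
  let st := (PySem.List.pyRange 0 len_y 1).foldl (fun st y =>
      (PySem.List.pyRange 0 len_x 1).foldl (fun st x =>
        pvDirs.foldl (pvSeedA grid len_y len_x fuel y x) st) st)
    (([] : PySem.Set (List Char)), ([] : List Int))
  PySem.List.sorted (st.2.filter (fun v => v != 0)) (fun v => v)

-- ===== PORT B =====
-- TURN = {'S': 0, 'L': 3, 'R': 1}; the rotation of the direction index caused by cell c.
-- TURN[c] raises KeyError on any other character — excluded by Pre_solution, default junk.
def pvTurnDict : PySem.Dict Char Int := PySem.Dict.ofList [('S', 0), ('L', 3), ('R', 1)]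
def pvTurn (c : Char) : Int := PySem.Dict.getD pvTurnDict c 0

-- Source B's step(s): move by DIRS[d], then turn at the target cell
def pvStep (grid : List String) (h w : Int) (s : Int × Int × Int) : Int × Int × Int :=
  let dd := PySem.List.pyGetD pvDirs s.2.2 (0, 0)
  let ny := PySem.Int.mod (s.1 + dd.1) h
  let nx := PySem.Int.mod (s.2.1 + dd.2) w
  (ny, nx, PySem.Int.mod (s.2.2 + pvTurn (pvChar grid ny nx)) 4)

-- Python's tuple comparison s < t on integer triples (lexicographic)
def pvLt (s t : Int × Int × Int) : Bool :=
  decide (s.1 < t.1) || (decide (s.1 = t.1) &&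
    (decide (s.2.1 < t.2.1) || (decide (s.2.1 = t.2.1) && decide (s.2.2 < t.2.2))))

-- the 'while s < t' loop of Source B; fuel (4·h·w)+1 strictly exceeds the number of
-- iterations the Python loop makes (it stops within one cycle of the step permutation)
def pvWhileC (grid : List String) (h w : Int) :
    Nat → (Int × Int × Int) → Int → (Int × Int × Int) → Int × (Int × Int × Int)
  | 0, _, n, t => (n, t)
  | fuel + 1, s, n, t =>
    if pvLt s t then pvWhileC grid h w fuel s (n + 1) (pvStep grid h w t) else (n, t)

def solution_alt (grid : List String) : List Int :=
  let h : Int := PySem.List.len grid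
  let w : Int := PySem.Str.len (PySem.List.pyGetD grid 0 "")
  let fuel : Nat := (4 * h * w + 1).toNat
  let lens := (PySem.List.pyRange 0 h 1).foldl (fun L y =>
    (PySem.List.pyRange 0 w 1).foldl (fun L x =>
      (PySem.List.pyRange 0 4 1).foldl (fun L d =>
        let s := (y, x, d)
        let r := pvWhileC grid h w fuel s 1 (pvStep grid h w s)
        if r.2 = s then L ++ [r.1] else L) L) L) []
  PySem.List.sorted lens (fun v => v)

-- ===== PRECONDITION & SPEC =====
-- Pre_ excludes grids on which the Python A raises: the empty list (IndexError on
-- grid[0]), rows shorter than row 0 reached by the walk (IndexError), and cells other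
-- than 'S'/'L'/'R' inside the first len(grid[0]) columns (go returns None, TypeError on
-- unpacking).  Rectangular S/L/R grids — the function's whole intended domain — satisfy it.
def Pre_solution (grid : List String) : Prop :=
  grid ≠ [] ∧ grid.all (fun s =>
    decide ((PySem.List.pyGetD grid 0 "").length ≤ s.length) &&
    (s.toList.take (PySem.List.pyGetD grid 0 "").length).all
      (fun c => c == 'S' || c == 'L' || c == 'R')) = true
instance (grid : List String) : Decidable (Pre_solution grid) := by
  unfold Pre_solution; infer_instance

def pvWitness_solution : List String := ["SL", "RS"]

def Spec_solution (grid : List String) (out : List Int) : Prop := out = solution_alt grid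
instance (grid : List String) (out : List Int) : Decidable (Spec_solution grid out) := by
  unfold Spec_solution; infer_instance

-- ===== CLAIM (what is proved, stated in full; the proofs are below) =====
def Claim_equal_solution : Prop :=
  ∀ (grid : List String), Dom_solution grid → Pre_solution grid →
    Spec_solution grid (solution grid)

-- ===== LEMMAS AND PROOFS =====

-- ---- the reference walker: A's walk over integer (y, x, direction-index) states with a
-- ---- global visited set.  Proof-side only; A is proved equal to it by the lockstep
-- ---- argument below, and B equal to it by the cycle-decomposition argument after that.

def pvWalkR (grid : List String) (len_y len_x : Int) :
    Nat → PySem.Set (Int × Int × Int) → Int → Int × Int × Int →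
      PySem.Set (Int × Int × Int) × Int
  | 0, seen, n, _ => (seen, n)
  | fuel + 1, seen, n, s =>
    if PySem.Set.contains seen s then (seen, n)
    else
      let dd := PySem.List.pyGetD pvDirs s.2.2 (0, 0)
      let sy := PySem.Int.mod (s.1 + dd.1) len_y
      let sx := PySem.Int.mod (s.2.1 + dd.2) len_x
      pvWalkR grid len_y len_x fuel (PySem.Set.add seen s) (n + 1)
        (sy, sx, PySem.Int.mod (s.2.2 + pvTurn (pvChar grid sy sx)) 4)

-- walker body for one seed state s (the seed of cell (y,x), incoming index d, is
-- (y, x, (d + TURN[grid[y][x]]) % 4))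
def pvSeedR (grid : List String) (len_y len_x : Int) (fuel : Nat)
    (st : PySem.Set (Int × Int × Int) × List Int) (s : Int × Int × Int) :
    PySem.Set (Int × Int × Int) × List Int :=
  if PySem.Set.contains st.1 s then st
  else
    let r := pvWalkR grid len_y len_x fuel st.1 0 s
    (r.1, st.2 ++ [r.2])

def pvRef (grid : List String) : List Int :=
  let len_y : Int := PySem.List.len grid
  let len_x : Int := PySem.Str.len (PySem.List.pyGetD grid 0 "")
  let fuel : Nat := (4 * len_y * len_x + 1).toNat
  let st := (PySem.List.pyRange 0 len_y 1).foldl (fun st y =>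
      (PySem.List.pyRange 0 len_x 1).foldl (fun st x =>
        (PySem.List.pyRange 0 4 1).foldl (fun st d =>
          pvSeedR grid len_y len_x fuel st
            (y, x, PySem.Int.mod (d + pvTurn (pvChar grid y x)) 4)) st) st)
    (([] : PySem.Set (Int × Int × Int)), ([] : List Int))
  PySem.List.sorted st.2 (fun v => v)

-- ---- decimal strings: str(n) decodes back to n, hence is injective, and has no comma ----

theorem pvDigitChar_ge (m : Nat) (h : 16 ≤ m) : Nat.digitChar m = '*' := by
  simp only [Nat.digitChar]
  repeat rw [if_neg (by omega)]

theorem pvDigitChar_ne_comma : ∀ m : Nat, Nat.digitChar m ≠ ',' := by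
  intro m
  rcases Nat.lt_or_ge m 16 with h | h
  · interval_cases m <;> decide
  · rw [pvDigitChar_ge m h]; decide

theorem pvDigitChar_toNat : ∀ m : Nat, m < 10 → (Nat.digitChar m).toNat = 48 + m := by
  intro m h; interval_cases m <;> decide

theorem pvToDigitsCore_unfold (f n : Nat) (ds : List Char) :
    Nat.toDigitsCore 10 (f + 1) n ds =
      if n / 10 = 0 then Nat.digitChar (n % 10) :: ds
      else Nat.toDigitsCore 10 f (n / 10) (Nat.digitChar (n % 10) :: ds) := by
  conv_lhs => rw [Nat.toDigitsCore]

def pvDecPair (cs : List Char) : Nat × Nat :=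
  cs.foldr (fun c p => (p.1 + (c.toNat - 48) * p.2, p.2 * 10)) (0, 1)

theorem pvDecPair_cons (c : Char) (cs : List Char) :
    pvDecPair (c :: cs) =
      ((pvDecPair cs).1 + (c.toNat - 48) * (pvDecPair cs).2, (pvDecPair cs).2 * 10) := rfl

theorem pvDecFst_core : ∀ (f n : Nat) (acc : List Char), n < f →
    (pvDecPair (Nat.toDigitsCore 10 f n acc)).1 =
      n * (pvDecPair acc).2 + (pvDecPair acc).1 := by
  intro f
  induction f with
  | zero => intro n acc h; omega
  | succ f ih =>
    intro n acc h
    rw [pvToDigitsCore_unfold]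
    by_cases h0 : n / 10 = 0
    · rw [if_pos h0, pvDecPair_cons, pvDigitChar_toNat (n % 10) (Nat.mod_lt _ (by norm_num))]
      have hn : n % 10 = n := by omega
      rw [hn, Nat.add_sub_cancel_left]
      ring
    · rw [if_neg h0]
      rw [ih (n / 10) _ (by omega)]
      rw [pvDecPair_cons, pvDigitChar_toNat (n % 10) (Nat.mod_lt _ (by norm_num)),
        Nat.add_sub_cancel_left]
      dsimp only
      have key : n / 10 * ((pvDecPair acc).2 * 10) + n % 10 * (pvDecPair acc).2 =
          n * (pvDecPair acc).2 := by
        rw [show n / 10 * ((pvDecPair acc).2 * 10)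
              = n / 10 * 10 * (pvDecPair acc).2 by ring, ← Nat.add_mul]
        congr 1
        omega
      omega

theorem pvToDigits_decode (n : Nat) : (pvDecPair (Nat.toDigits 10 n)).1 = n := by
  have := pvDecFst_core (n + 1) n [] (by omega)
  simpa [pvDecPair] using this

theorem pvToDigits_inj {m n : Nat} (h : Nat.toDigits 10 m = Nat.toDigits 10 n) : m = n := by
  have := pvToDigits_decode m
  rw [h, pvToDigits_decode] at this
  omega

theorem pvNocomma_core : ∀ (f n : Nat) (acc : List Char), ',' ∉ acc →
    ',' ∉ Nat.toDigitsCore 10 f n acc := by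
  intro f
  induction f with
  | zero => intro n acc h; simpa [Nat.toDigitsCore] using h
  | succ f ih =>
    intro n acc h
    rw [pvToDigitsCore_unfold]
    by_cases h0 : n / 10 = 0
    · rw [if_pos h0]
      intro hm
      rcases List.mem_cons.mp hm with h1 | h1
      · exact pvDigitChar_ne_comma _ h1.symm
      · exact h h1
    · rw [if_neg h0]
      apply ih
      intro hm
      rcases List.mem_cons.mp hm with h1 | h1
      · exact pvDigitChar_ne_comma _ h1.symm
      · exact h h1

theorem pvToChars_nonneg (y : Int) (h : 0 ≤ y) :
    PySem.Int.toChars y = Nat.toDigits 10 y.toNat := by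
  simp [PySem.Int.toChars, not_lt.mpr h]

theorem pvNocomma_toChars (y : Int) (h : 0 ≤ y) : ',' ∉ PySem.Int.toChars y := by
  rw [pvToChars_nonneg y h]
  exact pvNocomma_core _ _ _ (by simp)

theorem pvToChars_inj {y y' : Int} (hy : 0 ≤ y) (hy' : 0 ≤ y')
    (h : PySem.Int.toChars y = PySem.Int.toChars y') : y = y' := by
  rw [pvToChars_nonneg y hy, pvToChars_nonneg y' hy'] at h
  have := pvToDigits_inj h
  omega

theorem pvSplitComma : ∀ (a a' r r' : List Char), ',' ∉ a → ',' ∉ a' →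
    a ++ ',' :: r = a' ++ ',' :: r' → a = a' ∧ r = r' := by
  intro a
  induction a with
  | nil =>
    intro a' r r' _ ha' h
    cases a' with
    | nil => simpa using h
    | cons c t =>
      exfalso
      apply ha'
      simp only [List.nil_append, List.cons_append, List.cons.injEq] at h
      rw [← h.1]
      exact List.mem_cons_self
  | cons c t ih =>
    intro a' r r' ha ha' h
    cases a' with
    | nil =>
      exfalso
      apply ha
      simp only [List.cons_append, List.nil_append, List.cons.injEq] at h
      rw [h.1]
      exact List.mem_cons_self
    | cons c' t' =>
      simp only [List.cons_append, List.cons.injEq] at h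
      obtain ⟨h1, h2⟩ := ih t' r r' (fun hm => ha (List.mem_cons_of_mem _ hm))
        (fun hm => ha' (List.mem_cons_of_mem _ hm)) h.2
      exact ⟨by rw [h.1, h1], h2⟩

-- ---- the state abstraction: walker's integer triples vs A's arrow strings ----

def pvDirAt (d : Int) : Int × Int := PySem.List.pyGetD pvDirs d (0, 0)

def pvEncT (t : Int × Int × Int) : List Char :=
  pvArrow t.1 t.2.1 (pvDirAt t.2.2).1 (pvDirAt t.2.2).2

def pvInR (len_y len_x : Int) (t : Int × Int × Int) : Prop :=
  0 ≤ t.1 ∧ t.1 < len_y ∧ 0 ≤ t.2.1 ∧ t.2.1 < len_x ∧ 0 ≤ t.2.2 ∧ t.2.2 < 4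

def pvSLR (c : Char) : Prop := c = 'S' ∨ c = 'L' ∨ c = 'R'

theorem pvTailInj : ∀ (d d' : Int), 0 ≤ d → d < 4 → 0 ≤ d' → d' < 4 →
    PySem.Int.toChars (pvDirAt d).1 ++ ',' :: PySem.Int.toChars (pvDirAt d).2 =
      PySem.Int.toChars (pvDirAt d').1 ++ ',' :: PySem.Int.toChars (pvDirAt d').2 →
    d = d' := by
  intro d d' h1 h2 h3 h4 h
  interval_cases d <;> interval_cases d' <;>
    first
      | rfl
      | exact absurd h (by decide)

theorem pvEncT_inj {len_y len_x : Int} {t t' : Int × Int × Int}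
    (ht : pvInR len_y len_x t) (ht' : pvInR len_y len_x t')
    (h : pvEncT t = pvEncT t') : t = t' := by
  obtain ⟨hy, _, hx, _, hd1, hd2⟩ := ht
  obtain ⟨hy', _, hx', _, hd1', hd2'⟩ := ht'
  unfold pvEncT pvArrow at h
  obtain ⟨e1, h⟩ := pvSplitComma _ _ _ _ (pvNocomma_toChars _ hy) (pvNocomma_toChars _ hy') h
  obtain ⟨e2, h⟩ := pvSplitComma _ _ _ _ (pvNocomma_toChars _ hx) (pvNocomma_toChars _ hx') h
  have e3 := pvTailInj _ _ hd1 hd2 hd1' hd2' h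
  obtain ⟨a, b, c⟩ := t
  obtain ⟨a', b', c'⟩ := t'
  simp only [Prod.mk.injEq]
  exact ⟨pvToChars_inj hy hy' e1, pvToChars_inj hx hx' e2, e3⟩

theorem pvMemMap {len_y len_x : Int} {seen : List (Int × Int × Int)} {s : Int × Int × Int}
    (hseen : ∀ t ∈ seen, pvInR len_y len_x t) (hs : pvInR len_y len_x s) :
    pvEncT s ∈ seen.map pvEncT ↔ s ∈ seen := by
  constructor
  · intro h
    obtain ⟨t, htm, hte⟩ := List.mem_map.mp h
    exact pvEncT_inj (hseen t htm) hs hte ▸ htm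
  · exact List.mem_map_of_mem

-- go on a direction read off dirs is a rotation of the direction index
theorem pvGoTurn : ∀ (i : Int), 0 ≤ i → i < 4 → ∀ c, pvSLR c →
    pvGo c (pvDirAt i) = pvDirAt (PySem.Int.mod (i + pvTurn c) 4) := by
  intro i h1 h2 c hc
  rcases hc with h | h | h <;> subst h <;> interval_cases i <;> decide

-- the rows/characters facts packed in Pre_solution, in Prop form
theorem pvPreSpec (grid : List String) (hpre : Pre_solution grid) :
    ∀ s ∈ grid, (PySem.List.pyGetD grid 0 "").length ≤ s.length ∧
      ∀ c ∈ s.toList.take (PySem.List.pyGetD grid 0 "").length,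
        c = 'S' ∨ c = 'L' ∨ c = 'R' := by
  obtain ⟨-, h⟩ := hpre
  rw [List.all_eq_true] at h
  intro s hs
  have hss := h s hs
  simp only [Bool.and_eq_true, decide_eq_true_eq, List.all_eq_true, beq_iff_eq,
    Bool.or_eq_true] at hss
  refine ⟨hss.1, fun c hc => ?_⟩
  rcases hss.2 c hc with (h1 | h1) | h1 <;> tauto

-- every cell the walk reads is 'S', 'L' or 'R'
theorem pvCharSLR (grid : List String) (hpre : Pre_solution grid) (y x : Int)
    (hy1 : 0 ≤ y) (hy2 : y < PySem.List.len grid)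
    (hx1 : 0 ≤ x) (hx2 : x < PySem.Str.len (PySem.List.pyGetD grid 0 "")) :
    pvSLR (pvChar grid y x) := by
  have hall := pvPreSpec grid hpre
  rw [PySem.List.len_eq] at hy2
  have hyn : y.toNat < grid.length := by omega
  have hrow : PySem.List.pyGetD grid y "" = grid[y.toNat] :=
    PySem.List.pyGetD_eq_getElem _ _ hy1 (by exact_mod_cast hy2)
  have hmem : grid[y.toNat] ∈ grid := List.getElem_mem hyn
  obtain ⟨hlen, hchars⟩ := hall _ hmem
  rw [PySem.Str.len_eq] at hx2
  have hbr : (PySem.List.pyGetD grid 0 "").toList.length = (PySem.List.pyGetD grid 0 "").length :=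
    String.length_toList
  have hxn : x.toNat < (PySem.List.pyGetD grid 0 "").length := by omega
  have hxr : x.toNat < grid[y.toNat].length := by omega
  unfold pvChar
  rw [hrow]
  have hget : PySem.Str.pyGet? grid[y.toNat] x = grid[y.toNat].toList[x.toNat]? := by
    simp only [PySem.Str.pyGet?_eq, PySem.Chars.pyGet?_eq_listPyGet?]
    exact PySem.List.pyGet?_of_nonneg _ hx1
  have hxl : x.toNat < grid[y.toNat].toList.length := by
    rw [String.length_toList]; omega
  rw [hget, List.getElem?_eq_getElem hxl]
  have htake : grid[y.toNat].toList[x.toNat] ∈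
      grid[y.toNat].toList.take (PySem.List.pyGetD grid 0 "").length := by
    have : (grid[y.toNat].toList.take (PySem.List.pyGetD grid 0 "").length)[x.toNat]'
        (by rw [List.length_take]; omega) = grid[y.toNat].toList[x.toNat] := List.getElem_take
    exact this ▸ List.getElem_mem _
  exact hchars _ htake

-- ---- the paired walk: A's while loop and the walker's while loop move in lockstep ----

theorem pvWalkLock (grid : List String) (hpre : Pre_solution grid) (len_y len_x : Int)
    (hly : len_y = PySem.List.len grid)
    (hlx : len_x = PySem.Str.len (PySem.List.pyGetD grid 0 "")) :
    ∀ (fuel : Nat) (seen : PySem.Set (Int × Int × Int)) (cnt n : Int)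
      (y x sd : Int) (d : Int × Int),
      (∀ t ∈ seen, pvInR len_y len_x t) →
      pvInR len_y len_x (y, x, sd) →
      pvGo (pvChar grid y x) d = pvDirAt sd →
      ∃ (seen' : PySem.Set (Int × Int × Int)) (k : Int),
        pvWalkR grid len_y len_x fuel seen n (y, x, sd) = (seen', n + k) ∧
        pvLoopA grid len_y len_x fuel (seen.map pvEncT) cnt y x d = (seen'.map pvEncT, cnt + k) ∧
        (∀ t ∈ seen', pvInR len_y len_x t) ∧ 0 ≤ k ∧
        (fuel ≠ 0 → (y, x, sd) ∉ seen → 1 ≤ k) := by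
  intro fuel
  induction fuel with
  | zero =>
    intro seen cnt n y x sd d hseen hs hgo
    exact ⟨seen, 0, by simp [pvWalkR], by simp [pvLoopA], hseen, le_refl 0,
      fun h _ => absurd rfl h⟩
  | succ fuel ih =>
    intro seen cnt n y x sd d hseen hs hgo
    obtain ⟨hy1, hy2, hx1, hx2, hd1, hd2⟩ := hs
    simp only at hy1 hy2 hx1 hx2 hd1 hd2
    by_cases hmem : (y, x, sd) ∈ seen
    · have hA : pvEncT (y, x, sd) ∈ seen.map pvEncT :=
        (pvMemMap hseen ⟨hy1, hy2, hx1, hx2, hd1, hd2⟩).mpr hmem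
      refine ⟨seen, 0, ?_, ?_, hseen, le_refl 0, fun _ h => absurd hmem h⟩
      · simp only [pvWalkR]
        rw [if_pos (PySem.Set.contains_iff seen _ |>.mpr hmem), add_zero]
      · simp only [pvLoopA, hgo]
        rw [show pvArrow y x (pvDirAt sd).1 (pvDirAt sd).2 = pvEncT (y, x, sd) from rfl]
        rw [if_pos (PySem.Set.contains_iff _ _ |>.mpr hA), add_zero]
    · have hsr : pvInR len_y len_x (y, x, sd) := ⟨hy1, hy2, hx1, hx2, hd1, hd2⟩
      have hA : pvEncT (y, x, sd) ∉ seen.map pvEncT :=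
        fun h => hmem ((pvMemMap hseen hsr).mp h)
      have h0y : (0 : Int) < len_y := by omega
      have h0x : (0 : Int) < len_x := by omega
      set sy := PySem.Int.mod (y + (pvDirAt sd).1) len_y with hsy
      set sx := PySem.Int.mod (x + (pvDirAt sd).2) len_x with hsx
      have hsy1 : 0 ≤ sy := PySem.Int.mod_nonneg _ h0y
      have hsy2 : sy < len_y := PySem.Int.mod_lt _ h0y
      have hsx1 : 0 ≤ sx := PySem.Int.mod_nonneg _ h0x
      have hsx2 : sx < len_x := PySem.Int.mod_lt _ h0x
      have hc' : pvSLR (pvChar grid sy sx) :=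
        pvCharSLR grid hpre sy sx hsy1 (hly ▸ hsy2) hsx1 (hlx ▸ hsx2)
      set sd' := PySem.Int.mod (sd + pvTurn (pvChar grid sy sx)) 4 with hsd'
      have hgo' : pvGo (pvChar grid sy sx) (pvDirAt sd) = pvDirAt sd' :=
        pvGoTurn sd hd1 hd2 _ hc'
      have hsd1 : 0 ≤ sd' := PySem.Int.mod_nonneg _ (by norm_num)
      have hsd2 : sd' < 4 := PySem.Int.mod_lt _ (by norm_num)
      have hseen' : ∀ t ∈ seen ++ [(y, x, sd)], pvInR len_y len_x t := by
        intro t ht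
        rcases List.mem_append.mp ht with h | h
        · exact hseen t h
        · rw [List.mem_singleton.mp h]; exact hsr
      obtain ⟨seen', k, hB, hA2, hInR, hk, -⟩ :=
        ih (seen ++ [(y, x, sd)]) (cnt + 1) (n + 1) sy sx sd' (pvDirAt sd)
          hseen' ⟨hsy1, hsy2, hsx1, hsx2, hsd1, hsd2⟩ hgo'
      refine ⟨seen', k + 1, ?_, ?_, hInR, by omega, fun _ _ => by omega⟩
      · simp only [pvWalkR]
        rw [if_neg (fun h => hmem ((PySem.Set.contains_iff seen _).mp h))]
        rw [PySem.Set.add_of_not_mem hmem]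
        have : PySem.List.pyGetD pvDirs sd (0, 0) = pvDirAt sd := rfl
        simp only [this]
        rw [hB]
        ring_nf
      · simp only [pvLoopA, hgo]
        rw [show pvArrow y x (pvDirAt sd).1 (pvDirAt sd).2 = pvEncT (y, x, sd) from rfl]
        rw [if_neg (fun h => hA ((PySem.Set.contains_iff _ _).mp h))]
        rw [PySem.Set.add_of_not_mem hA, show (seen.map pvEncT) ++ [pvEncT (y, x, sd)]
          = (seen ++ [(y, x, sd)]).map pvEncT by simp]
        rw [hA2]
        ring_nf

-- ---- relating the accumulated fold states ----

def pvRel (len_y len_x : Int) (stA : PySem.Set (List Char) × List Int)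
    (stB : PySem.Set (Int × Int × Int) × List Int) : Prop :=
  stA.1 = stB.1.map pvEncT ∧ stA.2.filter (fun v => v != 0) = stB.2 ∧
    ∀ t ∈ stB.1, pvInR len_y len_x t

theorem pvFoldRel {α β γ : Type} (R : α → β → Prop) (fA : α → γ → α) (fB : β → γ → β) :
    ∀ (l : List γ) (a : α) (b : β), R a b →
      (∀ a b x, x ∈ l → R a b → R (fA a x) (fB b x)) →
      R (l.foldl fA a) (l.foldl fB b) := by
  intro l
  induction l with
  | nil => intro a b h _; exact h
  | cons c t ih =>
    intro a b h hstep
    exact ih _ _ (hstep a b c List.mem_cons_self h)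
      (fun a b x hx => hstep a b x (List.mem_cons_of_mem _ hx))

theorem pvSeedRel (grid : List String) (hpre : Pre_solution grid) (len_y len_x : Int)
    (hly : len_y = PySem.List.len grid)
    (hlx : len_x = PySem.Str.len (PySem.List.pyGetD grid 0 ""))
    (fuel : Nat) (hfuel : fuel ≠ 0) (y x i : Int)
    (hy1 : 0 ≤ y) (hy2 : y < len_y) (hx1 : 0 ≤ x) (hx2 : x < len_x)
    (hi1 : 0 ≤ i) (hi2 : i < 4)
    (stA : PySem.Set (List Char) × List Int) (stB : PySem.Set (Int × Int × Int) × List Int)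
    (hrel : pvRel len_y len_x stA stB) :
    pvRel len_y len_x (pvSeedA grid len_y len_x fuel y x stA (pvDirAt i))
      (pvSeedR grid len_y len_x fuel stB
        (y, x, PySem.Int.mod (i + pvTurn (pvChar grid y x)) 4)) := by
  obtain ⟨h1, h2, h3⟩ := hrel
  have hc : pvSLR (pvChar grid y x) := pvCharSLR grid hpre y x hy1 (hly ▸ hy2) hx1 (hlx ▸ hx2)
  set sd := PySem.Int.mod (i + pvTurn (pvChar grid y x)) 4 with hsd
  have hgo : pvGo (pvChar grid y x) (pvDirAt i) = pvDirAt sd := pvGoTurn i hi1 hi2 _ hc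
  have hsd1 : 0 ≤ sd := PySem.Int.mod_nonneg _ (by norm_num)
  have hsd2 : sd < 4 := PySem.Int.mod_lt _ (by norm_num)
  have hsr : pvInR len_y len_x (y, x, sd) := ⟨hy1, hy2, hx1, hx2, hsd1, hsd2⟩
  obtain ⟨seen', k, hB, hA2, hInR, hk0, hk1⟩ :=
    pvWalkLock grid hpre len_y len_x hly hlx fuel stB.1 0 0 y x sd (pvDirAt i) h3 hsr hgo
  rw [← h1] at hA2
  by_cases hmem : (y, x, sd) ∈ stB.1
  · -- the walker skips the seed; A's loop breaks immediately and appends a 0, filtered out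
    have hk : k = 0 ∧ seen' = stB.1 := by
      obtain ⟨f', rfl⟩ : ∃ f', fuel = f' + 1 := ⟨fuel - 1, by omega⟩
      simp only [pvWalkR] at hB
      rw [if_pos ((PySem.Set.contains_iff _ _).mpr hmem)] at hB
      have e1 : stB.1 = seen' := congrArg Prod.fst hB
      have e2 : (0 : Int) = 0 + k := congrArg Prod.snd hB
      exact ⟨by omega, e1.symm⟩
    obtain ⟨hk, hseen⟩ := hk
    subst hk
    unfold pvSeedA pvSeedR
    rw [if_pos ((PySem.Set.contains_iff _ _).mpr hmem), hA2]
    refine ⟨?_, ?_, h3⟩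
    · show List.map pvEncT seen' = List.map pvEncT stB.1
      rw [hseen]
    · show List.filter (fun v => v != 0) (stA.2 ++ [0 + 0]) = stB.2
      simp [List.filter_append, h2]
  · have hk : 1 ≤ k := hk1 hfuel hmem
    unfold pvSeedA pvSeedR
    rw [if_neg (fun h => hmem ((PySem.Set.contains_iff _ _).mp h)), hA2, hB]
    refine ⟨rfl, ?_, ?_⟩
    · show List.filter (fun v => v != 0) (stA.2 ++ [0 + k]) = stB.2 ++ [0 + k]
      simp [List.filter_append, h2]
      omega
    · show ∀ t ∈ seen', pvInR len_y len_x t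
      exact hInR

theorem pvInnerRel (grid : List String) (hpre : Pre_solution grid) (len_y len_x : Int)
    (hly : len_y = PySem.List.len grid)
    (hlx : len_x = PySem.Str.len (PySem.List.pyGetD grid 0 ""))
    (fuel : Nat) (hfuel : fuel ≠ 0) (y x : Int)
    (hy1 : 0 ≤ y) (hy2 : y < len_y) (hx1 : 0 ≤ x) (hx2 : x < len_x)
    (stA : PySem.Set (List Char) × List Int) (stB : PySem.Set (Int × Int × Int) × List Int)
    (hrel : pvRel len_y len_x stA stB) :
    pvRel len_y len_x (pvDirs.foldl (pvSeedA grid len_y len_x fuel y x) stA)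
      ((PySem.List.pyRange 0 4 1).foldl (fun st d =>
        pvSeedR grid len_y len_x fuel st
          (y, x, PySem.Int.mod (d + pvTurn (pvChar grid y x)) 4)) stB) := by
  have hr : PySem.List.pyRange 0 4 1 = [0, 1, 2, 3] := by decide
  rw [hr]
  show pvRel len_y len_x
    (pvSeedA grid len_y len_x fuel y x (pvSeedA grid len_y len_x fuel y x
      (pvSeedA grid len_y len_x fuel y x (pvSeedA grid len_y len_x fuel y x stA
        (1, 0)) (0, 1)) (-1, 0)) (0, -1)) _
  have e0 : ((1 : Int), (0 : Int)) = pvDirAt 0 := by decide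
  have e1 : ((0 : Int), (1 : Int)) = pvDirAt 1 := by decide
  have e2 : ((-1 : Int), (0 : Int)) = pvDirAt 2 := by decide
  have e3 : ((0 : Int), (-1 : Int)) = pvDirAt 3 := by decide
  rw [e0, e1, e2, e3]
  apply pvSeedRel grid hpre len_y len_x hly hlx fuel hfuel y x 3 hy1 hy2 hx1 hx2
    (by norm_num) (by norm_num)
  apply pvSeedRel grid hpre len_y len_x hly hlx fuel hfuel y x 2 hy1 hy2 hx1 hx2
    (by norm_num) (by norm_num)
  apply pvSeedRel grid hpre len_y len_x hly hlx fuel hfuel y x 1 hy1 hy2 hx1 hx2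
    (by norm_num) (by norm_num)
  exact pvSeedRel grid hpre len_y len_x hly hlx fuel hfuel y x 0 hy1 hy2 hx1 hx2
    (by norm_num) (by norm_num) stA stB hrel

-- A equals the reference walker on every admitted grid
theorem pvA_eq_ref (grid : List String) (hpre : Pre_solution grid) :
    solution grid = pvRef grid := by
  have hgne : grid ≠ [] := hpre.1
  have h0y : (0 : Int) < PySem.List.len grid := by
    rw [PySem.List.len_eq]
    exact_mod_cast List.length_pos_iff.mpr hgne
  have hmain : pvRel (PySem.List.len grid) (PySem.Str.len (PySem.List.pyGetD grid 0 ""))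
      ((PySem.List.pyRange 0 (PySem.List.len grid) 1).foldl (fun st y =>
        (PySem.List.pyRange 0 (PySem.Str.len (PySem.List.pyGetD grid 0 "")) 1).foldl (fun st x =>
          pvDirs.foldl (pvSeedA grid (PySem.List.len grid)
            (PySem.Str.len (PySem.List.pyGetD grid 0 ""))
            ((4 * PySem.List.len grid * PySem.Str.len (PySem.List.pyGetD grid 0 "") + 1).toNat)
            y x) st) st) ([], []))
      ((PySem.List.pyRange 0 (PySem.List.len grid) 1).foldl (fun st y =>
        (PySem.List.pyRange 0 (PySem.Str.len (PySem.List.pyGetD grid 0 "")) 1).foldl (fun st x =>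
          (PySem.List.pyRange 0 4 1).foldl (fun st d =>
            pvSeedR grid (PySem.List.len grid)
              (PySem.Str.len (PySem.List.pyGetD grid 0 ""))
              ((4 * PySem.List.len grid * PySem.Str.len (PySem.List.pyGetD grid 0 "") + 1).toNat)
              st (y, x, PySem.Int.mod (d + pvTurn (pvChar grid y x)) 4)) st) st) ([], [])) := by
    apply pvFoldRel
    · exact ⟨rfl, rfl, fun t ht => absurd ht List.not_mem_nil⟩
    · intro a b y hy hab
      have hyb := PySem.List.mem_pyRange_one.mp hy
      apply pvFoldRel _ _ _ _ _ _ hab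
      intro a b x hx hab2
      have hxb := PySem.List.mem_pyRange_one.mp hx
      have h0x : (0 : Int) < PySem.Str.len (PySem.List.pyGetD grid 0 "") := by omega
      have hfne : (4 * PySem.List.len grid * PySem.Str.len (PySem.List.pyGetD grid 0 "") + 1).toNat ≠ 0 := by
        have : (1 : Int) ≤ 4 * PySem.List.len grid * PySem.Str.len (PySem.List.pyGetD grid 0 "") := by
          nlinarith
        omega
      exact pvInnerRel grid hpre _ _ rfl rfl _ hfne y x hyb.1 hyb.2 hxb.1 hxb.2 a b hab2
  rw [show solution grid = PySem.List.sorted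
      ((((PySem.List.pyRange 0 (PySem.List.len grid) 1).foldl (fun st y =>
        (PySem.List.pyRange 0 (PySem.Str.len (PySem.List.pyGetD grid 0 "")) 1).foldl (fun st x =>
          pvDirs.foldl (pvSeedA grid (PySem.List.len grid)
            (PySem.Str.len (PySem.List.pyGetD grid 0 ""))
            ((4 * PySem.List.len grid * PySem.Str.len (PySem.List.pyGetD grid 0 "") + 1).toNat)
            y x) st) st) ([], []))).2.filter (fun v => v != 0)) (fun v => v) from rfl,
    show pvRef grid = PySem.List.sorted
      ((((PySem.List.pyRange 0 (PySem.List.len grid) 1).foldl (fun st y =>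
        (PySem.List.pyRange 0 (PySem.Str.len (PySem.List.pyGetD grid 0 "")) 1).foldl (fun st x =>
          (PySem.List.pyRange 0 4 1).foldl (fun st d =>
            pvSeedR grid (PySem.List.len grid)
              (PySem.Str.len (PySem.List.pyGetD grid 0 ""))
              ((4 * PySem.List.len grid * PySem.Str.len (PySem.List.pyGetD grid 0 "") + 1).toNat)
              st (y, x, PySem.Int.mod (d + pvTurn (pvChar grid y x)) 4)) st) st) ([], []))).2)
      (fun v => v) from rfl,
    hmain.2.1]

-- ---- cycle decomposition of the step permutation: the walker vs B ----

def pvIt (grid : List String) (h w : Int) (n : Nat) (s : Int × Int × Int) : Int × Int × Int :=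
  (pvStep grid h w)^[n] s

def pvKey (w : Int) (s : Int × Int × Int) : Int := (s.1 * w + s.2.1) * 4 + s.2.2

def pvPeriod (grid : List String) (h w : Int) (s : Int × Int × Int) : Nat :=
  match (List.range (4 * h * w).toNat).find? (fun k => decide (pvIt grid h w (k + 1) s = s)) with
  | some k => k + 1
  | none => 0

def pvOrb (grid : List String) (h w : Int) (s : Int × Int × Int) : List (Int × Int × Int) :=
  (List.range (pvPeriod grid h w s)).map (fun i => pvIt grid h w i s)

def pvIsMin (grid : List String) (h w : Int) (s : Int × Int × Int) : Bool :=
  (pvOrb grid h w s).all (fun t => decide (t = s) || decide (pvKey w s < pvKey w t))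

def pvRep (grid : List String) (h w : Int) (s : Int × Int × Int) : Int × Int × Int :=
  (pvOrb grid h w s).foldl (fun m u => if pvKey w u < pvKey w m then u else m) s

def pvOrd (h w : Int) : List (Int × Int × Int) :=
  (PySem.List.pyRange 0 h 1).flatMap (fun y =>
    (PySem.List.pyRange 0 w 1).flatMap (fun x =>
      (PySem.List.pyRange 0 4 1).map (fun d => (y, x, d))))

def pvSeeds (grid : List String) (h w : Int) : List (Int × Int × Int) :=
  (PySem.List.pyRange 0 h 1).flatMap (fun y =>
    (PySem.List.pyRange 0 w 1).flatMap (fun x =>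
      (PySem.List.pyRange 0 4 1).map (fun d =>
        (y, x, PySem.Int.mod (d + pvTurn (pvChar grid y x)) 4))))

-- the list of first-discovered cycle representatives after processing a seed list
def pvDisc (grid : List String) (h w : Int) (D : List (Int × Int × Int)) :
    List (Int × Int × Int) → List (Int × Int × Int)
  | [] => D
  | s :: r => pvDisc grid h w (if s ∈ D.flatMap (pvOrb grid h w) then D else D ++ [s]) r

theorem pvStep_mem (grid : List String) (h w : Int) (s : Int × Int × Int)
    (hs : pvInR h w s) : pvInR h w (pvStep grid h w s) := by
  obtain ⟨h1, h2, h3, h4, h5, h6⟩ := hs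
  exact ⟨PySem.Int.mod_nonneg _ (by omega), PySem.Int.mod_lt _ (by omega),
    PySem.Int.mod_nonneg _ (by omega), PySem.Int.mod_lt _ (by omega),
    PySem.Int.mod_nonneg _ (by norm_num), PySem.Int.mod_lt _ (by norm_num)⟩

theorem pvModCancel (a b m : Int) (hm : 0 < m) (h1 : -m < a - b) (h2 : a - b < m)
    (he : PySem.Int.mod a m = PySem.Int.mod b m) : a = b := by
  rw [PySem.Int.mod_eq_emod_of_pos hm, PySem.Int.mod_eq_emod_of_pos hm] at he
  have h0 : (a - b) % m = 0 := by rw [Int.sub_emod, he, sub_self, Int.zero_emod]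
  obtain ⟨c, hc⟩ := Int.dvd_of_emod_eq_zero h0
  rcases lt_trichotomy c 0 with hcc | hcc | hcc
  · have : m * c ≤ m * (-1) := by
      apply mul_le_mul_of_nonneg_left (by omega) (by omega)
    omega
  · simp [hcc] at hc; omega
  · have : m * 1 ≤ m * c := by
      apply mul_le_mul_of_nonneg_left (by omega) (by omega)
    omega

theorem pvStep_inj (grid : List String) (h w : Int) (s t : Int × Int × Int)
    (hs : pvInR h w s) (ht : pvInR h w t)
    (heq : pvStep grid h w s = pvStep grid h w t) : s = t := by
  obtain ⟨a1, a2, a3, a4, a5, a6⟩ := hs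
  obtain ⟨b1, b2, b3, b4, b5, b6⟩ := ht
  simp only [pvStep, Prod.mk.injEq] at heq
  obtain ⟨e1, e2, e3⟩ := heq
  rw [e1, e2] at e3
  -- same target cell, so the same turn value: the direction indices agree
  have hd : s.2.2 = t.2.2 := by
    simp only [PySem.Int.mod_eq_emod_of_pos (b := 4) (by norm_num)] at e3
    omega
  rw [hd] at e1 e2
  have hy1 := pvModCancel _ _ h (by omega) (by omega) (by omega) e1
  have hx1 := pvModCancel _ _ w (by omega) (by omega) (by omega) e2
  have hy : s.1 = t.1 := by omega
  have hx : s.2.1 = t.2.1 := by omega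
  obtain ⟨y, x, d⟩ := s
  obtain ⟨y', x', d'⟩ := t
  simp only at hd hy hx
  simp [hd, hy, hx]

theorem pvIt_succ' (grid : List String) (h w : Int) (n : Nat) (s : Int × Int × Int) :
    pvIt grid h w (n + 1) s = pvStep grid h w (pvIt grid h w n s) :=
  Function.iterate_succ_apply' _ _ _

theorem pvIt_add (grid : List String) (h w : Int) (m n : Nat) (s : Int × Int × Int) :
    pvIt grid h w (m + n) s = pvIt grid h w m (pvIt grid h w n s) :=
  Function.iterate_add_apply _ _ _ _

theorem pvIt_mem (grid : List String) (h w : Int) (n : Nat) (s : Int × Int × Int)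
    (hs : pvInR h w s) : pvInR h w (pvIt grid h w n s) := by
  induction n with
  | zero => exact hs
  | succ n ih => rw [pvIt_succ']; exact pvStep_mem _ _ _ _ ih

theorem pvIt_inj (grid : List String) (h w : Int) (n : Nat) (s t : Int × Int × Int)
    (hs : pvInR h w s) (ht : pvInR h w t)
    (heq : pvIt grid h w n s = pvIt grid h w n t) : s = t := by
  induction n with
  | zero => exact heq
  | succ n ih =>
    rw [pvIt_succ', pvIt_succ'] at heq
    exact ih (pvStep_inj grid h w _ _ (pvIt_mem _ _ _ _ _ hs) (pvIt_mem _ _ _ _ _ ht) heq)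

theorem pvCancel (grid : List String) (h w : Int) (i m : Nat) (s : Int × Int × Int)
    (hs : pvInR h w s) (heq : pvIt grid h w i s = pvIt grid h w (i + m) s) :
    pvIt grid h w m s = s := by
  rw [pvIt_add] at heq
  exact pvIt_inj grid h w i _ _ (pvIt_mem _ _ _ _ _ hs) hs heq.symm

theorem pvKey_bounds (w : Int) (h : Int) (s : Int × Int × Int) (hs : pvInR h w s) :
    0 ≤ pvKey w s ∧ pvKey w s < 4 * h * w := by
  obtain ⟨h1, h2, h3, h4, h5, h6⟩ := hs
  unfold pvKey
  have e1 : 0 ≤ s.1 * w := mul_nonneg h1 (by omega)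
  have e2 : s.1 * w ≤ (h - 1) * w := mul_le_mul_of_nonneg_right (by omega) (by omega)
  have e3 : (h - 1) * w = h * w - w := by ring
  constructor <;> nlinarith


theorem pvKeyLt_of_lex (w : Int) (h : Int) (s t : Int × Int × Int)
    (hs : pvInR h w s) (ht : pvInR h w t)
    (hlex : s.1 < t.1 ∨ (s.1 = t.1 ∧ (s.2.1 < t.2.1 ∨ (s.2.1 = t.2.1 ∧ s.2.2 < t.2.2)))) :
    pvKey w s < pvKey w t := by
  obtain ⟨a1, a2, a3, a4, a5, a6⟩ := hs
  obtain ⟨b1, b2, b3, b4, b5, b6⟩ := ht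
  unfold pvKey
  rcases hlex with h1 | ⟨h1, h2 | ⟨h2, h3⟩⟩
  · have e1 : (s.1 + 1) * w ≤ t.1 * w := mul_le_mul_of_nonneg_right (by omega) (by omega)
    have e2 : (s.1 + 1) * w = s.1 * w + w := by ring
    nlinarith
  · rw [h1]; nlinarith
  · rw [h1, h2]; omega

theorem pvKey_inj (w : Int) (h : Int) (s t : Int × Int × Int)
    (hs : pvInR h w s) (ht : pvInR h w t) (heq : pvKey w s = pvKey w t) : s = t := by
  by_contra hne
  obtain ⟨a, b, c⟩ := s
  obtain ⟨a', b', c'⟩ := t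
  have hlex : (a < a' ∨ (a = a' ∧ (b < b' ∨ (b = b' ∧ c < c')))) ∨
      (a' < a ∨ (a' = a ∧ (b' < b ∨ (b' = b ∧ c' < c)))) := by
    simp only [Prod.mk.injEq, not_and_or] at hne
    omega
  rcases hlex with hl | hl
  · have := pvKeyLt_of_lex w h _ _ hs ht hl; omega
  · have := pvKeyLt_of_lex w h _ _ ht hs hl; omega

theorem pvExistsRet (grid : List String) (h w : Int) (s : Int × Int × Int)
    (hs : pvInR h w s) :
    ∃ k, 0 < k ∧ k ≤ (4 * h * w).toNat ∧ pvIt grid h w k s = s := by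
  have hmaps : Set.MapsTo (fun i => (pvKey w (pvIt grid h w i s)).toNat)
      ↑(Finset.range ((4 * h * w).toNat + 1)) ↑(Finset.range (4 * h * w).toNat) := by
    intro i _
    simp only [Finset.coe_range, Set.mem_Iio]
    have hb := pvKey_bounds w h _ (pvIt_mem grid h w i s hs)
    omega
  obtain ⟨i, hi, j, hj, hij, hfe⟩ :=
    Finset.exists_ne_map_eq_of_card_lt_of_maps_to (by simp) hmaps
  simp only [Finset.mem_range] at hi hj
  have hke : pvKey w (pvIt grid h w i s) = pvKey w (pvIt grid h w j s) := by
    have hb1 := pvKey_bounds w h _ (pvIt_mem grid h w i s hs)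
    have hb2 := pvKey_bounds w h _ (pvIt_mem grid h w j s hs)
    omega
  have hit : pvIt grid h w i s = pvIt grid h w j s :=
    pvKey_inj w h _ _ (pvIt_mem grid h w i s hs) (pvIt_mem grid h w j s hs) hke
  rcases lt_or_gt_of_ne hij with hlt | hlt
  · refine ⟨j - i, by omega, by omega, ?_⟩
    exact pvCancel grid h w i (j - i) s hs (by rw [show i + (j - i) = j by omega]; exact hit)
  · refine ⟨i - j, by omega, by omega, ?_⟩
    exact pvCancel grid h w j (i - j) s hs
      (by rw [show j + (i - j) = i by omega]; exact hit.symm)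

theorem pvPeriod_spec (grid : List String) (h w : Int) (s : Int × Int × Int)
    (hs : pvInR h w s) :
    0 < pvPeriod grid h w s ∧ pvPeriod grid h w s ≤ (4 * h * w).toNat ∧
      pvIt grid h w (pvPeriod grid h w s) s = s ∧
      ∀ m, 0 < m → m < pvPeriod grid h w s → pvIt grid h w m s ≠ s := by
  obtain ⟨k0, hk1, hk2, hk3⟩ := pvExistsRet grid h w s hs
  cases hf : (List.range (4 * h * w).toNat).find?
      (fun k => decide (pvIt grid h w (k + 1) s = s)) with
  | none =>
    exfalso
    have := List.find?_eq_none.mp hf (k0 - 1) (List.mem_range.mpr (by omega))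
    apply this
    simp only [decide_eq_true_eq]
    rw [show k0 - 1 + 1 = k0 by omega]
    exact hk3
  | some k1 =>
    obtain ⟨hp, i, hilt, hie, hmin⟩ := List.find?_eq_some_iff_getElem.mp hf
    rw [List.getElem_range] at hie
    subst hie
    have hper : pvPeriod grid h w s = i + 1 := by
      unfold pvPeriod
      rw [hf]
    rw [hper]
    rw [List.length_range] at hilt
    refine ⟨by omega, by omega, by simpa using hp, ?_⟩
    intro m hm1 hm2 hme
    have := hmin (m - 1) (by omega)
    rw [List.getElem_range] at this
    simp only [Bool.not_eq_eq_eq_not, Bool.not_true, decide_eq_false_iff_not] at this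
    apply this
    rw [show m - 1 + 1 = m by omega]
    exact hme

theorem pvIt_ne (grid : List String) (h w : Int) (s : Int × Int × Int)
    (hs : pvInR h w s) (i j : Nat) (hij : i < j) (hj : j < pvPeriod grid h w s) :
    pvIt grid h w i s ≠ pvIt grid h w j s := by
  intro heq
  have := pvCancel grid h w i (j - i) s hs (by rw [show i + (j - i) = j by omega]; exact heq)
  exact (pvPeriod_spec grid h w s hs).2.2.2 (j - i) (by omega) (by omega) this

theorem mem_pvOrb (grid : List String) (h w : Int) (s t : Int × Int × Int) :
    t ∈ pvOrb grid h w s ↔ ∃ i, i < pvPeriod grid h w s ∧ pvIt grid h w i s = t := by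
  simp only [pvOrb, List.mem_map, List.mem_range]

theorem self_mem_pvOrb (grid : List String) (h w : Int) (s : Int × Int × Int)
    (hs : pvInR h w s) : s ∈ pvOrb grid h w s :=
  (mem_pvOrb grid h w s s).mpr ⟨0, (pvPeriod_spec grid h w s hs).1, rfl⟩

theorem pvOrb_subR (grid : List String) (h w : Int) (s t : Int × Int × Int)
    (hs : pvInR h w s) (ht : t ∈ pvOrb grid h w s) : pvInR h w t := by
  obtain ⟨i, -, rfl⟩ := (mem_pvOrb grid h w s t).mp ht
  exact pvIt_mem grid h w i s hs

-- wrap-around: iteration indices count modulo the period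
theorem pvIt_period_add (grid : List String) (h w : Int) (s : Int × Int × Int)
    (hper : pvIt grid h w (pvPeriod grid h w s) s = s) (m : Nat) :
    pvIt grid h w (m + pvPeriod grid h w s) s = pvIt grid h w m s := by
  rw [pvIt_add, hper]

theorem pvIt_mod (grid : List String) (h w : Int) (s : Int × Int × Int)
    (hper : pvIt grid h w (pvPeriod grid h w s) s = s)
    (hpos : 0 < pvPeriod grid h w s) (m : Nat) :
    pvIt grid h w m s = pvIt grid h w (m % pvPeriod grid h w s) s := by
  induction m using Nat.strong_induction_on with
  | _ m ih =>
    by_cases hm : m < pvPeriod grid h w s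
    · rw [Nat.mod_eq_of_lt hm]
    · have : m - pvPeriod grid h w s + pvPeriod grid h w s = m := by omega
      rw [← this, pvIt_period_add grid h w s hper, ih _ (by omega),
        Nat.add_mod_right]

theorem pvPeriod_shift (grid : List String) (h w : Int) (s : Int × Int × Int)
    (hs : pvInR h w s) (i : Nat) :
    pvPeriod grid h w (pvIt grid h w i s) = pvPeriod grid h w s := by
  obtain ⟨hk0, hkN, hkret, hkmin⟩ := pvPeriod_spec grid h w s hs
  set k := pvPeriod grid h w s with hk
  have htR : pvInR h w (pvIt grid h w i s) := pvIt_mem grid h w i s hs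
  obtain ⟨ht0, htN, htret, htmin⟩ := pvPeriod_spec grid h w _ htR
  set kt := pvPeriod grid h w (pvIt grid h w i s) with hkt
  -- t returns after k steps, so kt ≤ k
  have hretk : pvIt grid h w k (pvIt grid h w i s) = pvIt grid h w i s := by
    rw [← pvIt_add, Nat.add_comm, pvIt_add, hkret]
  have hle1 : kt ≤ k := by
    by_contra hlt
    exact htmin k hk0 (by omega) hretk
  -- s lies on t's cycle, so it returns after kt steps and k ≤ kt
  have hi0 : pvIt grid h w (i % k) s = pvIt grid h w i s := (pvIt_mod grid h w s hkret hk0 i).symm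
  by_cases hz : i % k = 0
  · have : pvIt grid h w i s = s := by rw [← hi0, hz]; rfl
    rw [hkt, this, ← hk]
  · have hsb : pvIt grid h w (k - i % k) (pvIt grid h w i s) = s := by
      rw [← hi0, ← pvIt_add, show k - i % k + i % k = k by
        have := Nat.mod_lt i hk0; omega]
      exact hkret
    have hrets : pvIt grid h w kt s = s := by
      conv_lhs => rw [← hsb]
      rw [← pvIt_add, Nat.add_comm, pvIt_add, htret, hsb]
    have hle2 : k ≤ kt := by
      by_contra hlt
      exact hkmin kt ht0 (by omega) hrets
    omega

theorem pvOrb_shift (grid : List String) (h w : Int) (s t : Int × Int × Int)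
    (hs : pvInR h w s) (ht : t ∈ pvOrb grid h w s) :
    ∀ x, x ∈ pvOrb grid h w t ↔ x ∈ pvOrb grid h w s := by
  obtain ⟨hk0, hkN, hkret, hkmin⟩ := pvPeriod_spec grid h w s hs
  obtain ⟨i, hik, rfl⟩ := (mem_pvOrb grid h w s t).mp ht
  have hkt : pvPeriod grid h w (pvIt grid h w i s) = pvPeriod grid h w s :=
    pvPeriod_shift grid h w s hs i
  set k := pvPeriod grid h w s with hkdef
  intro x
  rw [mem_pvOrb, mem_pvOrb, hkt, ← hkdef]
  constructor
  · rintro ⟨j, hjk, rfl⟩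
    refine ⟨(j + i) % k, Nat.mod_lt _ hk0, ?_⟩
    rw [← pvIt_mod grid h w s hkret hk0, pvIt_add]
  · rintro ⟨m, hmk, rfl⟩
    refine ⟨(m + k - i) % k, Nat.mod_lt _ hk0, ?_⟩
    rw [← pvIt_add, pvIt_mod grid h w s hkret hk0 ((m + k - i) % k + i), Nat.mod_add_mod,
      show (m + k - i) + i = m + k by omega, Nat.add_mod_right, Nat.mod_eq_of_lt hmk]

-- the single multiplication fact: lexicographic order of in-range states is key order
theorem pvLt_iff (w h : Int) (s t : Int × Int × Int)
    (hs : pvInR h w s) (ht : pvInR h w t) :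
    pvLt s t = true ↔ pvKey w s < pvKey w t := by
  constructor
  · intro hl
    apply pvKeyLt_of_lex w h s t hs ht
    unfold pvLt at hl
    simp only [Bool.or_eq_true, Bool.and_eq_true, decide_eq_true_eq] at hl
    tauto
  · intro hk
    obtain ⟨a, b, c⟩ := s
    obtain ⟨a', b', c'⟩ := t
    by_contra hl
    unfold pvLt at hl
    simp only [Bool.or_eq_true, Bool.and_eq_true, decide_eq_true_eq] at hl
    have hlex : a' < a ∨ (a' = a ∧ (b' < b ∨ (b' = b ∧ c' < c))) ∨
        (a = a' ∧ b = b' ∧ c = c') := by omega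
    rcases hlex with h1 | h1 | ⟨h1, h2, h3⟩
    · have := pvKeyLt_of_lex w h _ _ ht hs (Or.inl h1); omega
    · have := pvKeyLt_of_lex w h _ _ ht hs (Or.inr h1); omega
    · subst h1; subst h2; subst h3; omega

theorem pvFoldMin_mem (w : Int) (l : List (Int × Int × Int)) :
    ∀ m, l.foldl (fun m u => if pvKey w u < pvKey w m then u else m) m ∈ m :: l := by
  induction l with
  | nil => intro m; simp [List.foldl]
  | cons u r ih =>
    intro m
    simp only [List.foldl]
    rcases List.mem_cons.mp (ih (if pvKey w u < pvKey w m then u else m)) with hm | hm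
    · rw [hm]; split
      · simp
      · simp
    · simp [hm]

theorem pvFoldMin_le (w : Int) (l : List (Int × Int × Int)) :
    ∀ m, pvKey w (l.foldl (fun m u => if pvKey w u < pvKey w m then u else m) m) ≤ pvKey w m ∧
      ∀ u ∈ l, pvKey w (l.foldl (fun m u => if pvKey w u < pvKey w m then u else m) m) ≤ pvKey w u := by
  induction l with
  | nil => intro m; simp [List.foldl]
  | cons u r ih =>
    intro m
    simp only [List.foldl]
    obtain ⟨ih1, ih2⟩ := ih (if pvKey w u < pvKey w m then u else m)
    have hm : pvKey w (if pvKey w u < pvKey w m then u else m) ≤ pvKey w m := by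
      split <;> omega
    have hu : pvKey w (if pvKey w u < pvKey w m then u else m) ≤ pvKey w u := by
      split <;> omega
    refine ⟨by omega, fun v hv => ?_⟩
    rcases List.mem_cons.mp hv with rfl | hv
    · omega
    · exact ih2 v hv

theorem pvRep_mem (grid : List String) (h w : Int) (s : Int × Int × Int)
    (hs : pvInR h w s) : pvRep grid h w s ∈ pvOrb grid h w s := by
  rcases List.mem_cons.mp (pvFoldMin_mem w (pvOrb grid h w s) s) with hm | hm
  · rw [pvRep, hm]; exact self_mem_pvOrb grid h w s hs
  · exact hm

theorem pvRep_min (grid : List String) (h w : Int) (s : Int × Int × Int)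
    (_hs : pvInR h w s) :
    ∀ u ∈ pvOrb grid h w s, pvKey w (pvRep grid h w s) ≤ pvKey w u :=
  (pvFoldMin_le w (pvOrb grid h w s) s).2

theorem pvRep_orb (grid : List String) (h w : Int) (s t : Int × Int × Int)
    (hs : pvInR h w s) (ht : t ∈ pvOrb grid h w s) :
    pvRep grid h w t = pvRep grid h w s := by
  have htR : pvInR h w t := pvOrb_subR grid h w s t hs ht
  have hset := pvOrb_shift grid h w s t hs ht
  have h1' : pvRep grid h w t ∈ pvOrb grid h w s := (hset _).mp (pvRep_mem grid h w t htR)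
  have h2' : pvRep grid h w s ∈ pvOrb grid h w t := (hset _).mpr (pvRep_mem grid h w s hs)
  apply pvKey_inj w h _ _ (pvOrb_subR grid h w s _ hs h1')
    (pvOrb_subR grid h w s _ hs (pvRep_mem grid h w s hs))
  exact le_antisymm (pvRep_min grid h w t htR _ h2') (pvRep_min grid h w s hs _ h1')

theorem pvIsMin_iff (grid : List String) (h w : Int) (s : Int × Int × Int)
    (hs : pvInR h w s) : pvIsMin grid h w s = true ↔ pvRep grid h w s = s := by
  unfold pvIsMin
  rw [List.all_eq_true]
  constructor
  · intro hall
    have hmem := pvRep_mem grid h w s hs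
    rcases Bool.or_eq_true _ _ |>.mp (hall _ hmem) with h1 | h1
    · exact decide_eq_true_eq.mp h1
    · have := pvRep_min grid h w s hs s (self_mem_pvOrb grid h w s hs)
      have hlt := decide_eq_true_eq.mp h1
      omega
  · intro hrep u hu
    by_cases hus : u = s
    · simp [hus]
    · have := pvRep_min grid h w s hs u hu
      rw [hrep] at this
      have hne : pvKey w s ≠ pvKey w u := fun hk =>
        hus (pvKey_inj w h u s (pvOrb_subR grid h w s u hs hu) hs hk.symm)
      simp only [Bool.or_eq_true, decide_eq_true_eq]
      right; omega

theorem pvRep_idem (grid : List String) (h w : Int) (s : Int × Int × Int)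
    (hs : pvInR h w s) : pvRep grid h w (pvRep grid h w s) = pvRep grid h w s :=
  pvRep_orb grid h w s _ hs (pvRep_mem grid h w s hs)

theorem pvPeriod_orb (grid : List String) (h w : Int) (s t : Int × Int × Int)
    (hs : pvInR h w s) (ht : t ∈ pvOrb grid h w s) :
    pvPeriod grid h w t = pvPeriod grid h w s := by
  obtain ⟨i, -, rfl⟩ := (mem_pvOrb grid h w s t).mp ht
  exact pvPeriod_shift grid h w s hs i

-- ---- B's while loop: it returns to s exactly when s is the minimum of its cycle ----

theorem pvLt_irrefl (s : Int × Int × Int) : pvLt s s = false := by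
  simp [pvLt]

theorem pvWalkC_min (grid : List String) (h w : Int) (s : Int × Int × Int)
    (hs : pvInR h w s)
    (hmin : ∀ i, 0 < i → i < pvPeriod grid h w s →
      pvKey w s < pvKey w (pvIt grid h w i s)) :
    ∀ (fuel m : Nat) (n : Int), 0 < m → m ≤ pvPeriod grid h w s →
      pvPeriod grid h w s - m ≤ fuel →
      pvWhileC grid h w fuel s n (pvIt grid h w m s) =
        (n + ((pvPeriod grid h w s - m : Nat) : Int), s) := by
  obtain ⟨hk0, hkN, hkret, hkmin⟩ := pvPeriod_spec grid h w s hs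
  intro fuel
  induction fuel with
  | zero =>
    intro m n hm1 hm2 hf
    have hmk : m = pvPeriod grid h w s := by omega
    subst hmk
    rw [hkret]
    simp [pvWhileC]
  | succ f ih =>
    intro m n hm1 hm2 hf
    by_cases hmk : m = pvPeriod grid h w s
    · subst hmk
      rw [hkret]
      simp [pvWhileC, pvLt_irrefl]
    · have hmlt : m < pvPeriod grid h w s := by omega
      have hlt : pvLt s (pvIt grid h w m s) = true :=
        (pvLt_iff w h _ _ hs (pvIt_mem grid h w m s hs)).mpr (hmin m hm1 hmlt)
      simp only [pvWhileC]
      rw [if_pos hlt, ← pvIt_succ']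
      rw [ih (m + 1) (n + 1) (by omega) (by omega) (by omega)]
      have he : n + 1 + ((pvPeriod grid h w s - (m + 1) : Nat) : Int)
          = n + ((pvPeriod grid h w s - m : Nat) : Int) := by omega
      rw [he]

theorem pvWalkC_notmin (grid : List String) (h w : Int) (s : Int × Int × Int)
    (hs : pvInR h w s) (hnm : pvIsMin grid h w s = false) :
    ∀ fuel, pvPeriod grid h w s ≤ fuel →
      (pvWhileC grid h w fuel s 1 (pvStep grid h w s)).2 ≠ s := by
  obtain ⟨hk0, hkN, hkret, hkmin⟩ := pvPeriod_spec grid h w s hs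
  rw [pvIsMin, List.all_eq_false] at hnm
  obtain ⟨u, hu, hup⟩ := hnm
  simp only [Bool.or_eq_true, decide_eq_true_eq, not_or, not_lt] at hup
  obtain ⟨i, hik, rfl⟩ := (mem_pvOrb grid h w s u).mp hu
  have hi0 : 0 < i := by
    rcases Nat.eq_zero_or_pos i with rfl | hpos
    · exact absurd rfl hup.1
    · exact hpos
  have hex : ∃ j, 0 < j ∧ ¬ pvKey w s < pvKey w (pvIt grid h w j s) :=
    ⟨i, hi0, by omega⟩
  set j0 := Nat.find hex with hj0
  obtain ⟨hj0pos, hj0key⟩ := Nat.find_spec hex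
  have hj0le : j0 ≤ i := Nat.find_min' hex ⟨hi0, by omega⟩
  have hj0k : j0 < pvPeriod grid h w s := by omega
  have hwalk : ∀ (fuel m : Nat) (n : Int), 0 < m → m ≤ j0 → j0 - m ≤ fuel →
      pvWhileC grid h w fuel s n (pvIt grid h w m s) =
        (n + ((j0 - m : Nat) : Int), pvIt grid h w j0 s) := by
    intro fuel
    induction fuel with
    | zero =>
      intro m n hm1 hm2 hf
      have hmj : m = j0 := by omega
      rw [hmj]
      simp [pvWhileC]
    | succ f ih =>
      intro m n hm1 hm2 hf
      by_cases hmj : m = j0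
      · rw [hmj]
        have hlt : pvLt s (pvIt grid h w j0 s) = false := by
          rw [← Bool.not_eq_true]
          intro hc
          exact hj0key ((pvLt_iff w h _ _ hs (pvIt_mem grid h w j0 s hs)).mp hc)
        simp only [pvWhileC]
        rw [if_neg (by simp [hlt])]
        simp
      · have hmlt : m < j0 := by omega
        have hnP := Nat.find_min hex hmlt
        simp only [not_and, not_not] at hnP
        have hkey : pvKey w s < pvKey w (pvIt grid h w m s) := hnP hm1
        have hlt : pvLt s (pvIt grid h w m s) = true :=
          (pvLt_iff w h _ _ hs (pvIt_mem grid h w m s hs)).mpr hkey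
        simp only [pvWhileC]
        rw [if_pos hlt, ← pvIt_succ']
        rw [ih (m + 1) (n + 1) (by omega) (by omega) (by omega)]
        have he : n + 1 + ((j0 - (m + 1) : Nat) : Int) = n + ((j0 - m : Nat) : Int) := by omega
        rw [he]
  intro fuel hfuel
  have h1 : pvStep grid h w s = pvIt grid h w 1 s := (pvIt_succ' grid h w 0 s).symm
  rw [h1, hwalk fuel 1 1 (by omega) (by omega) (by omega)]
  exact hkmin j0 hj0pos hj0k

-- the body of Source B's innermost loop, as a filtered append of the cycle length
theorem pvBodyC (grid : List String) (h w : Int) (s : Int × Int × Int)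
    (hs : pvInR h w s) (fuel : Nat) (hfuel : (4 * h * w).toNat ≤ fuel) (L : List Int) :
    (if (pvWhileC grid h w fuel s 1 (pvStep grid h w s)).2 = s
      then L ++ [(pvWhileC grid h w fuel s 1 (pvStep grid h w s)).1] else L)
    = if pvIsMin grid h w s = true then L ++ [(pvPeriod grid h w s : Int)] else L := by
  obtain ⟨hk0, hkN, hkret, hkmin⟩ := pvPeriod_spec grid h w s hs
  cases hm : pvIsMin grid h w s with
  | true =>
    have hmin : ∀ i, 0 < i → i < pvPeriod grid h w s →
        pvKey w s < pvKey w (pvIt grid h w i s) := by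
      intro i hi1 hi2
      have hmem : pvIt grid h w i s ∈ pvOrb grid h w s :=
        (mem_pvOrb grid h w s _).mpr ⟨i, hi2, rfl⟩
      have := (List.all_eq_true.mp hm) _ hmem
      rcases Bool.or_eq_true _ _ |>.mp this with h1 | h1
      · exact absurd (decide_eq_true_eq.mp h1) (hkmin i hi1 hi2)
      · exact decide_eq_true_eq.mp h1
    have h1 : pvStep grid h w s = pvIt grid h w 1 s := (pvIt_succ' grid h w 0 s).symm
    rw [h1, pvWalkC_min grid h w s hs hmin fuel 1 1 (by omega) (by omega) (by omega)]
    have he : (1 : Int) + ((pvPeriod grid h w s - 1 : Nat) : Int)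
        = (pvPeriod grid h w s : Int) := by omega
    simp [he]
  | false =>
    rw [if_neg (pvWalkC_notmin grid h w s hs hm fuel (by omega))]
    simp

-- ---- the walker's while loop traverses exactly one fresh cycle ----

theorem pvWalkR_unfold (grid : List String) (h w : Int) (fuel : Nat)
    (seen : PySem.Set (Int × Int × Int)) (n : Int) (s : Int × Int × Int) :
    pvWalkR grid h w (fuel + 1) seen n s =
      if PySem.Set.contains seen s then (seen, n)
      else pvWalkR grid h w fuel (PySem.Set.add seen s) (n + 1) (pvStep grid h w s) := rfl

theorem pvWalkR_cycle (grid : List String) (h w : Int) (s : Int × Int × Int)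
    (hs : pvInR h w s) (seen : PySem.Set (Int × Int × Int))
    (hdisj : ∀ u ∈ pvOrb grid h w s, u ∉ seen) :
    ∀ (fuel m : Nat) (n : Int), m ≤ pvPeriod grid h w s →
      pvPeriod grid h w s + 1 - m ≤ fuel →
      pvWalkR grid h w fuel
        (seen ++ (List.range m).map (fun i => pvIt grid h w i s)) n (pvIt grid h w m s)
      = (seen ++ pvOrb grid h w s, n + ((pvPeriod grid h w s - m : Nat) : Int)) := by
  obtain ⟨hk0, hkN, hkret, hkmin⟩ := pvPeriod_spec grid h w s hs
  intro fuel
  induction fuel with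
  | zero => intro m n hm hf; omega
  | succ f ih =>
    intro m n hm hf
    by_cases hmk : m = pvPeriod grid h w s
    · rw [hmk, hkret, pvWalkR_unfold]
      have hmem : s ∈ seen ++ (List.range (pvPeriod grid h w s)).map
          (fun i => pvIt grid h w i s) := by
        apply List.mem_append_right
        exact List.mem_map.mpr ⟨0, List.mem_range.mpr hk0, rfl⟩
      rw [if_pos ((PySem.Set.contains_iff _ _).mpr hmem)]
      have : (List.range (pvPeriod grid h w s)).map (fun i => pvIt grid h w i s)
          = pvOrb grid h w s := rfl
      rw [this]
      simp
    · have hmlt : m < pvPeriod grid h w s := by omega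
      have hfresh : pvIt grid h w m s ∉ seen ++ (List.range m).map
          (fun i => pvIt grid h w i s) := by
        intro hc
        rcases List.mem_append.mp hc with hc | hc
        · exact hdisj _ ((mem_pvOrb grid h w s _).mpr ⟨m, hmlt, rfl⟩) hc
        · obtain ⟨i, hi, hie⟩ := List.mem_map.mp hc
          rw [List.mem_range] at hi
          exact pvIt_ne grid h w s hs i m hi hmlt hie
      rw [pvWalkR_unfold,
        if_neg (fun hc => hfresh ((PySem.Set.contains_iff _ _).mp hc)),
        PySem.Set.add_of_not_mem hfresh]
      have hpre : (seen ++ (List.range m).map (fun i => pvIt grid h w i s))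
            ++ [pvIt grid h w m s]
          = seen ++ (List.range (m + 1)).map (fun i => pvIt grid h w i s) := by
        rw [List.range_succ, List.map_append, List.append_assoc]
        rfl
      rw [hpre, show pvStep grid h w (pvIt grid h w m s) = pvIt grid h w (m + 1) s from
        (pvIt_succ' grid h w m s).symm]
      rw [ih (m + 1) (n + 1) (by omega) (by omega)]
      have he : n + 1 + ((pvPeriod grid h w s - (m + 1) : Nat) : Int)
          = n + ((pvPeriod grid h w s - m : Nat) : Int) := by omega
      rw [he]

-- one walker seed step, in terms of the discovered-representatives list
theorem pvSeedR_disc (grid : List String) (h w : Int) (fuel : Nat)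
    (hfuel : (4 * h * w).toNat + 1 ≤ fuel) (s : Int × Int × Int) (hs : pvInR h w s)
    (D : List (Int × Int × Int)) (hD : ∀ u ∈ D, pvInR h w u) (lens : List Int) :
    pvSeedR grid h w fuel (D.flatMap (pvOrb grid h w), lens) s =
      ((if s ∈ D.flatMap (pvOrb grid h w) then D else D ++ [s]).flatMap (pvOrb grid h w),
        if s ∈ D.flatMap (pvOrb grid h w) then lens
        else lens ++ [(pvPeriod grid h w s : Int)]) := by
  by_cases hmem : s ∈ D.flatMap (pvOrb grid h w)
  · rw [pvSeedR, if_pos ((PySem.Set.contains_iff _ _).mpr hmem), if_pos hmem, if_pos hmem]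
  · have hdisj : ∀ u ∈ pvOrb grid h w s, u ∉ D.flatMap (pvOrb grid h w) := by
      intro u hu hc
      obtain ⟨d, hd, hud⟩ := List.mem_flatMap.mp hc
      have h1 : s ∈ pvOrb grid h w u :=
        (pvOrb_shift grid h w s u hs hu s).mpr (self_mem_pvOrb grid h w s hs)
      have h2 : s ∈ pvOrb grid h w d :=
        (pvOrb_shift grid h w d u (hD d hd) hud s).mp h1
      exact hmem (List.mem_flatMap.mpr ⟨d, hd, h2⟩)
    rw [pvSeedR, if_neg (fun hc => hmem ((PySem.Set.contains_iff _ _).mp hc)),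
      if_neg hmem, if_neg hmem]
    have hk := pvPeriod_spec grid h w s hs
    have hw := pvWalkR_cycle grid h w s hs (D.flatMap (pvOrb grid h w)) hdisj
      fuel 0 0 (by omega) (by omega)
    simp only [List.range_zero, List.map_nil, List.append_nil] at hw
    rw [show pvIt grid h w 0 s = s from rfl] at hw
    rw [hw]
    simp [List.flatMap_append]

-- the walker's outer fold computes the discovered list's cycles and lengths
theorem pvFoldR (grid : List String) (h w : Int) (fuel : Nat)
    (hfuel : (4 * h * w).toNat + 1 ≤ fuel) :
    ∀ (SD : List (Int × Int × Int)), (∀ s ∈ SD, pvInR h w s) →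
      ∀ (D : List (Int × Int × Int)), (∀ u ∈ D, pvInR h w u) →
      SD.foldl (pvSeedR grid h w fuel)
        (D.flatMap (pvOrb grid h w), D.map (fun u => (pvPeriod grid h w u : Int)))
      = ((pvDisc grid h w D SD).flatMap (pvOrb grid h w),
         (pvDisc grid h w D SD).map (fun u => (pvPeriod grid h w u : Int))) := by
  intro SD
  induction SD with
  | nil => intro _ D _; rfl
  | cons s r ih =>
    intro hSD D hD
    have hs : pvInR h w s := hSD s List.mem_cons_self
    rw [List.foldl_cons, pvSeedR_disc grid h w fuel hfuel s hs D hD]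
    have hD' : ∀ u ∈ (if s ∈ D.flatMap (pvOrb grid h w) then D else D ++ [s]),
        pvInR h w u := by
      intro u hu
      split at hu
      · exact hD u hu
      · rcases List.mem_append.mp hu with hu | hu
        · exact hD u hu
        · rw [List.mem_singleton.mp hu]; exact hs
    have hmap : (if s ∈ D.flatMap (pvOrb grid h w) then D.map (fun u => (pvPeriod grid h w u : Int))
          else D.map (fun u => (pvPeriod grid h w u : Int)) ++ [(pvPeriod grid h w s : Int)])
        = (if s ∈ D.flatMap (pvOrb grid h w) then D else D ++ [s]).map
            (fun u => (pvPeriod grid h w u : Int)) := by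
      split <;> simp
    rw [hmap]
    rw [ih (fun t ht => hSD t (List.mem_cons_of_mem _ ht)) _ hD']
    rfl

-- ---- properties of the discovered-representatives list ----

theorem pvDisc_mem (grid : List String) (h w : Int) :
    ∀ (SD D : List (Int × Int × Int)) (u : Int × Int × Int),
      u ∈ pvDisc grid h w D SD → u ∈ D ∨ u ∈ SD := by
  intro SD
  induction SD with
  | nil => intro D u hu; exact Or.inl hu
  | cons s r ih =>
    intro D u hu
    rcases ih _ u hu with hu | hu
    · split at hu
      · exact Or.inl hu
      · rcases List.mem_append.mp hu with hu | hu
        · exact Or.inl hu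
        · exact Or.inr (List.mem_cons.mpr (Or.inl (List.mem_singleton.mp hu)))
    · exact Or.inr (List.mem_cons_of_mem _ hu)

theorem pvDisc_flat_mono (grid : List String) (h w : Int) :
    ∀ (SD D : List (Int × Int × Int)) (x : Int × Int × Int),
      x ∈ D.flatMap (pvOrb grid h w) → x ∈ (pvDisc grid h w D SD).flatMap (pvOrb grid h w) := by
  intro SD
  induction SD with
  | nil => intro D x hx; exact hx
  | cons s r ih =>
    intro D x hx
    apply ih
    split
    · exact hx
    · rw [List.flatMap_append]
      exact List.mem_append_left _ hx

theorem pvDisc_covers (grid : List String) (h w : Int) :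
    ∀ (SD : List (Int × Int × Int)), (∀ s ∈ SD, pvInR h w s) →
      ∀ (D : List (Int × Int × Int)), ∀ s ∈ SD,
        s ∈ (pvDisc grid h w D SD).flatMap (pvOrb grid h w) := by
  intro SD
  induction SD with
  | nil => intro _ D s hs; exact absurd hs List.not_mem_nil
  | cons t r ih =>
    intro hSD D s hs
    rcases List.mem_cons.mp hs with rfl | hs
    · show s ∈ (pvDisc grid h w _ r).flatMap (pvOrb grid h w)
      by_cases hmem : s ∈ D.flatMap (pvOrb grid h w)
      · rw [if_pos hmem]
        exact pvDisc_flat_mono grid h w r D s hmem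
      · rw [if_neg hmem]
        apply pvDisc_flat_mono grid h w r (D ++ [s]) s
        rw [List.flatMap_append]
        apply List.mem_append_right
        simp only [List.flatMap_cons, List.flatMap_nil, List.append_nil]
        exact self_mem_pvOrb grid h w s (hSD s List.mem_cons_self)
    · exact ih (fun u hu => hSD u (List.mem_cons_of_mem _ hu)) _ s hs

theorem pvFreshRep (grid : List String) (h w : Int) (s : Int × Int × Int)
    (D : List (Int × Int × Int)) (hs : pvInR h w s) (hD : ∀ u ∈ D, pvInR h w u)
    (hfresh : s ∉ D.flatMap (pvOrb grid h w)) :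
    pvRep grid h w s ∉ D.map (pvRep grid h w) := by
  intro hc
  obtain ⟨d, hd, he⟩ := List.mem_map.mp hc
  have h1 : s ∈ pvOrb grid h w (pvRep grid h w s) :=
    (pvOrb_shift grid h w s _ hs (pvRep_mem grid h w s hs) s).mpr
      (self_mem_pvOrb grid h w s hs)
  rw [← he] at h1
  have h2 : s ∈ pvOrb grid h w d :=
    (pvOrb_shift grid h w d _ (hD d hd) (pvRep_mem grid h w d (hD d hd)) s).mp h1
  exact hfresh (List.mem_flatMap.mpr ⟨d, hd, h2⟩)

theorem pvDisc_reps_nodup (grid : List String) (h w : Int) :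
    ∀ (SD : List (Int × Int × Int)), (∀ s ∈ SD, pvInR h w s) →
      ∀ (D : List (Int × Int × Int)), (∀ u ∈ D, pvInR h w u) →
      (D.map (pvRep grid h w)).Nodup →
      ((pvDisc grid h w D SD).map (pvRep grid h w)).Nodup := by
  intro SD
  induction SD with
  | nil => intro _ D _ hn; exact hn
  | cons s r ih =>
    intro hSD D hD hn
    have hs : pvInR h w s := hSD s List.mem_cons_self
    show ((pvDisc grid h w _ r).map (pvRep grid h w)).Nodup
    by_cases hmem : s ∈ D.flatMap (pvOrb grid h w)
    · rw [if_pos hmem]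
      exact ih (fun u hu => hSD u (List.mem_cons_of_mem _ hu)) D hD hn
    · rw [if_neg hmem]
      apply ih (fun u hu => hSD u (List.mem_cons_of_mem _ hu))
      · intro u hu
        rcases List.mem_append.mp hu with hu | hu
        · exact hD u hu
        · rw [List.mem_singleton.mp hu]; exact hs
      · rw [List.map_append]
        simp only [List.map_cons, List.map_nil]
        rw [List.nodup_append]
        refine ⟨hn, List.nodup_singleton _, ?_⟩
        intro a ha b hb hab
        rw [List.mem_singleton.mp hb] at hab
        rw [hab] at ha
        exact pvFreshRep grid h w s D hs hD hmem ha

-- ---- the two enumerations of the state space ----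

theorem mem_pvOrd (h w : Int) (s : Int × Int × Int) : s ∈ pvOrd h w ↔ pvInR h w s := by
  obtain ⟨y, x, d⟩ := s
  simp only [pvOrd, List.mem_flatMap, List.mem_map, PySem.List.mem_pyRange_one, pvInR]
  constructor
  · rintro ⟨y', hy', x', hx', d', hd', he⟩
    simp only [Prod.mk.injEq] at he
    obtain ⟨rfl, rfl, rfl⟩ := he
    exact ⟨hy'.1, hy'.2, hx'.1, hx'.2, hd'.1, hd'.2⟩
  · rintro ⟨h1, h2, h3, h4, h5, h6⟩
    exact ⟨y, ⟨h1, h2⟩, x, ⟨h3, h4⟩, d, ⟨h5, h6⟩, rfl⟩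

theorem mem_pvSeeds (grid : List String) (h w : Int) (s : Int × Int × Int) :
    s ∈ pvSeeds grid h w ↔ pvInR h w s := by
  obtain ⟨y, x, d⟩ := s
  simp only [pvSeeds, List.mem_flatMap, List.mem_map, PySem.List.mem_pyRange_one, pvInR]
  constructor
  · rintro ⟨y', hy', x', hx', d', hd', he⟩
    simp only [Prod.mk.injEq] at he
    obtain ⟨rfl, rfl, hd⟩ := he
    refine ⟨hy'.1, hy'.2, hx'.1, hx'.2, ?_, ?_⟩ <;> rw [← hd]
    · exact PySem.Int.mod_nonneg _ (by norm_num)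
    · exact PySem.Int.mod_lt _ (by norm_num)
  · rintro ⟨h1, h2, h3, h4, h5, h6⟩
    refine ⟨y, ⟨h1, h2⟩, x, ⟨h3, h4⟩,
      PySem.Int.mod (d - pvTurn (pvChar grid y x)) 4,
      ⟨PySem.Int.mod_nonneg _ (by norm_num), PySem.Int.mod_lt _ (by norm_num)⟩, ?_⟩
    have hm : PySem.Int.mod (PySem.Int.mod (d - pvTurn (pvChar grid y x)) 4
        + pvTurn (pvChar grid y x)) 4 = d := by
      simp only [PySem.Int.mod_eq_emod_of_pos (b := 4) (by norm_num)]
      omega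
    rw [hm]

theorem nodup_pvOrd (h w : Int) : (pvOrd h w).Nodup := by
  rw [pvOrd, List.nodup_flatMap]
  constructor
  · intro y hy
    rw [List.nodup_flatMap]
    constructor
    · intro x hx
      exact List.Nodup.map (fun a b hab => by simpa using hab)
        (PySem.List.nodup_pyRange_one 0 4)
    · refine List.Pairwise.imp ?_ (PySem.List.pairwise_lt_pyRange_one 0 w)
      intro a b hab t ht ht'
      obtain ⟨d, -, rfl⟩ := List.mem_map.mp ht
      obtain ⟨d', -, he⟩ := List.mem_map.mp ht'
      simp only [Prod.mk.injEq] at he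
      omega
  · refine List.Pairwise.imp ?_ (PySem.List.pairwise_lt_pyRange_one 0 h)
    intro a b hab t ht ht'
    obtain ⟨x, -, hx⟩ := List.mem_flatMap.mp ht
    obtain ⟨d, -, rfl⟩ := List.mem_map.mp hx
    obtain ⟨x', -, hx'⟩ := List.mem_flatMap.mp ht'
    obtain ⟨d', -, he⟩ := List.mem_map.mp hx'
    simp only [Prod.mk.injEq] at he
    omega

-- ---- the two length lists are permutations: one entry per cycle, the cycle's length ----

theorem pvPermMain (grid : List String) (h w : Int) :
    ((pvDisc grid h w [] (pvSeeds grid h w)).map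
      (fun u => (pvPeriod grid h w u : Int))).Perm
    (((pvOrd h w).filter (fun s => pvIsMin grid h w s)).map
      (fun u => (pvPeriod grid h w u : Int))) := by
  have hSD : ∀ s ∈ pvSeeds grid h w, pvInR h w s :=
    fun s hs => (mem_pvSeeds grid h w s).mp hs
  have hD1R : ∀ u ∈ pvDisc grid h w [] (pvSeeds grid h w), pvInR h w u := by
    intro u hu
    rcases pvDisc_mem grid h w _ _ u hu with hc | hc
    · exact absurd hc List.not_mem_nil
    · exact hSD u hc
  have hmapl : (pvDisc grid h w [] (pvSeeds grid h w)).map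
        (fun u => (pvPeriod grid h w u : Int))
      = ((pvDisc grid h w [] (pvSeeds grid h w)).map (pvRep grid h w)).map
        (fun u => (pvPeriod grid h w u : Int)) := by
    rw [List.map_map]
    apply List.map_congr_left
    intro d hd
    simp only [Function.comp]
    rw [pvPeriod_orb grid h w d _ (hD1R d hd) (pvRep_mem grid h w d (hD1R d hd))]
  rw [hmapl]
  apply List.Perm.map
  rw [List.perm_ext_iff_of_nodup
    (pvDisc_reps_nodup grid h w _ hSD [] (fun u hu => absurd hu List.not_mem_nil) (by simp))
    (List.Nodup.filter _ (nodup_pvOrd h w))]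
  intro x
  constructor
  · intro hx
    obtain ⟨d, hd, rfl⟩ := List.mem_map.mp hx
    have hdR := hD1R d hd
    have hrR : pvInR h w (pvRep grid h w d) :=
      pvOrb_subR grid h w d _ hdR (pvRep_mem grid h w d hdR)
    rw [List.mem_filter]
    exact ⟨(mem_pvOrd h w _).mpr hrR,
      (pvIsMin_iff grid h w _ hrR).mpr (pvRep_idem grid h w d hdR)⟩
  · intro hx
    rw [List.mem_filter] at hx
    have hxR := (mem_pvOrd h w x).mp hx.1
    have hrep : pvRep grid h w x = x := (pvIsMin_iff grid h w x hxR).mp hx.2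
    have hxSD : x ∈ pvSeeds grid h w := (mem_pvSeeds grid h w x).mpr hxR
    obtain ⟨d, hd, hxd⟩ := List.mem_flatMap.mp (pvDisc_covers grid h w _ hSD [] x hxSD)
    have hdR : pvInR h w d := hD1R d hd
    have he : pvRep grid h w x = pvRep grid h w d := pvRep_orb grid h w d x hdR hxd
    rw [hrep] at he
    exact List.mem_map.mpr ⟨d, hd, he.symm⟩

-- ---- assembling both programs' unsorted length lists ----

theorem pvLenNonneg (grid : List String) :
    0 ≤ PySem.List.len grid ∧ 0 ≤ PySem.Str.len (PySem.List.pyGetD grid 0 "") := by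
  rw [PySem.List.len_eq, PySem.Str.len_eq]
  omega

theorem pvFuelGe (grid : List String) :
    (4 * PySem.List.len grid * PySem.Str.len (PySem.List.pyGetD grid 0 "")).toNat + 1 ≤
      (4 * PySem.List.len grid * PySem.Str.len (PySem.List.pyGetD grid 0 "") + 1).toNat := by
  obtain ⟨hh, hw⟩ := pvLenNonneg grid
  have h4 : (0 : Int) ≤ 4 * PySem.List.len grid * PySem.Str.len (PySem.List.pyGetD grid 0 "") := by
    have := mul_nonneg hh hw
    nlinarith
  omega

theorem pvRef_eq (grid : List String) :
    pvRef grid = PySem.List.sorted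
      ((pvDisc grid (PySem.List.len grid) (PySem.Str.len (PySem.List.pyGetD grid 0 "")) []
        (pvSeeds grid (PySem.List.len grid) (PySem.Str.len (PySem.List.pyGetD grid 0 "")))).map
        (fun u => (pvPeriod grid (PySem.List.len grid)
          (PySem.Str.len (PySem.List.pyGetD grid 0 "")) u : Int)))
      (fun v => v) := by
  have hflat : ((pvSeeds grid (PySem.List.len grid)
        (PySem.Str.len (PySem.List.pyGetD grid 0 ""))).foldl
      (pvSeedR grid (PySem.List.len grid) (PySem.Str.len (PySem.List.pyGetD grid 0 ""))
        ((4 * PySem.List.len grid * PySem.Str.len (PySem.List.pyGetD grid 0 "") + 1).toNat))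
      (([] : PySem.Set (Int × Int × Int)), ([] : List Int)))
      = ((pvDisc grid (PySem.List.len grid) (PySem.Str.len (PySem.List.pyGetD grid 0 "")) []
          (pvSeeds grid (PySem.List.len grid)
            (PySem.Str.len (PySem.List.pyGetD grid 0 "")))).flatMap
          (pvOrb grid (PySem.List.len grid) (PySem.Str.len (PySem.List.pyGetD grid 0 ""))),
        (pvDisc grid (PySem.List.len grid) (PySem.Str.len (PySem.List.pyGetD grid 0 "")) []
          (pvSeeds grid (PySem.List.len grid)
            (PySem.Str.len (PySem.List.pyGetD grid 0 "")))).map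
          (fun u => (pvPeriod grid (PySem.List.len grid)
            (PySem.Str.len (PySem.List.pyGetD grid 0 "")) u : Int))) :=
    pvFoldR grid _ _ _ (pvFuelGe grid) _
      (fun s hs => (mem_pvSeeds grid _ _ s).mp hs) []
      (fun u hu => absurd hu List.not_mem_nil)
  rw [show pvRef grid = PySem.List.sorted
      (((pvSeeds grid (PySem.List.len grid)
          (PySem.Str.len (PySem.List.pyGetD grid 0 ""))).foldl
        (pvSeedR grid (PySem.List.len grid) (PySem.Str.len (PySem.List.pyGetD grid 0 ""))
          ((4 * PySem.List.len grid * PySem.Str.len (PySem.List.pyGetD grid 0 "") + 1).toNat))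
        (([] : PySem.Set (Int × Int × Int)), ([] : List Int))).2) (fun v => v) from by
    simp only [pvSeeds, List.foldl_flatMap, List.foldl_map]
    rfl]
  rw [hflat]

theorem pvAlt_eq (grid : List String) :
    solution_alt grid = PySem.List.sorted
      (((pvOrd (PySem.List.len grid) (PySem.Str.len (PySem.List.pyGetD grid 0 ""))).filter
        (fun s => pvIsMin grid (PySem.List.len grid)
          (PySem.Str.len (PySem.List.pyGetD grid 0 "")) s)).map
        (fun u => (pvPeriod grid (PySem.List.len grid)
          (PySem.Str.len (PySem.List.pyGetD grid 0 "")) u : Int)))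
      (fun v => v) := by
  rw [show solution_alt grid = PySem.List.sorted
      (((pvOrd (PySem.List.len grid) (PySem.Str.len (PySem.List.pyGetD grid 0 ""))).foldl
        (fun L s =>
          if (pvWhileC grid (PySem.List.len grid) (PySem.Str.len (PySem.List.pyGetD grid 0 ""))
              ((4 * PySem.List.len grid * PySem.Str.len (PySem.List.pyGetD grid 0 "") + 1).toNat)
              s 1 (pvStep grid (PySem.List.len grid)
                (PySem.Str.len (PySem.List.pyGetD grid 0 "")) s)).2 = s
          then L ++ [(pvWhileC grid (PySem.List.len grid)
              (PySem.Str.len (PySem.List.pyGetD grid 0 ""))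
              ((4 * PySem.List.len grid * PySem.Str.len (PySem.List.pyGetD grid 0 "") + 1).toNat)
              s 1 (pvStep grid (PySem.List.len grid)
                (PySem.Str.len (PySem.List.pyGetD grid 0 "")) s)).1]
          else L) [])) (fun v => v) from by
    simp only [pvOrd, List.foldl_flatMap, List.foldl_map]
    rfl]
  rw [PySem.List.foldl_congr_mem _ _
    (fun L s => if pvIsMin grid (PySem.List.len grid)
        (PySem.Str.len (PySem.List.pyGetD grid 0 "")) s = true
      then L ++ [(pvPeriod grid (PySem.List.len grid)
        (PySem.Str.len (PySem.List.pyGetD grid 0 "")) s : Int)] else L) []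
    (fun acc x hx => pvBodyC grid _ _ x ((mem_pvOrd _ _ x).mp hx) _
      (by have := pvFuelGe grid; omega) acc)]
  rw [PySem.List.foldl_append_if]
  simp

-- both length lists are rearrangements of the cycle lengths, so the sorts agree
theorem pvRef_eq_alt (grid : List String) : pvRef grid = solution_alt grid := by
  rw [pvRef_eq, pvAlt_eq]
  exact (PySem.List.sorted_id_eq_sorted_id_iff_perm _ _).mpr (pvPermMain grid _ _)

-- ===== VERDICT (by name: the statement is the Claim_ definition above) =====
theorem solution_spec : Claim_equal_solution := by
  intro grid _hdom hpre
  unfold Spec_solution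
  rw [pvA_eq_ref grid hpre, pvRef_eq_alt]
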